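-- pv_equiv track=rewrite | github.com/svend4/meta | projects/hexuniqgrp/hexuniqgrp.py | chord_count
-- ===== SOURCE A (Python) =====
-- from math import factorial
--
-- def chord_count(n: int, k: int) -> int:
--     """Число расстановок k непересекающихся хорд на n точках окружности.
--
--     chord(n, k) = (1/k!) · ∏_{i=1}^{k} C(n - 2(i-1), 2)
--     """
--     if k <= 0 or 2 * k > n:
--         return 0
--     result = 1
--     for i in range(1, k + 1):
--         m = n - 2 * (i - 1)
--         result *= m * (m - 1) // 2
--     return result // factorial(k)
-- ===== SOURCE B (Python) =====
-- from math import comb, factorial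
--
--
-- def chord_count(n: int, k: int) -> int:
--     """Число расстановок k непересекающихся хорд на n точках окружности."""
--     if k <= 0 or 2 * k > n:
--         return 0
--     # choose the 2k endpoints, then pair them up: (2k-1)!! = (2k)! / (2^k k!)
--     return comb(n, 2 * k) * factorial(2 * k) // (2 ** k * factorial(k))
-- ===== Notes on version B (the rewrite author's own statement) =====
-- stated objective: idiomatic
-- what changed: Replaces the k-step accumulation loop (multiplying C(n-2(i-1),2) terms, then dividing by k!) with the closed-form expression comb(n, 2k) * (2k)! // (2^k * k!): pick the 2k endpoints, times the number of perfect pairings.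
import Mathlib
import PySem

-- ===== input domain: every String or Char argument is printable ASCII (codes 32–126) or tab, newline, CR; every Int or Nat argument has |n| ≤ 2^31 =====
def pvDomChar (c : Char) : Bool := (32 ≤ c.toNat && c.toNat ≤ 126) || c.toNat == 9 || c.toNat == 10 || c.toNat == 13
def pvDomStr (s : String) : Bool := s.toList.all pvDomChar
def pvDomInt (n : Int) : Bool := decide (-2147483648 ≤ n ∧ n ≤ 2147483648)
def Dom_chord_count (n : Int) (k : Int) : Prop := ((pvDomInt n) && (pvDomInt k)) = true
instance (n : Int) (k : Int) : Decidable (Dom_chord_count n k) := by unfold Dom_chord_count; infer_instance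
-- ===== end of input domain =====

-- B replaces A's k-step accumulation loop by the closed-form expression
-- comb(n, 2k) * (2k)! // (2^k * k!); same value, one expression instead of a loop (objective: idiomatic).

-- math.factorial; exact for nonnegative arguments (both ports only call it with argument ≥ 0)
def pyFactorial (k : Int) : Int := (Nat.factorial k.toNat : Int)

-- math.comb; exact for nonnegative arguments (B only calls it with 0 ≤ 2k ≤ n)
def pyComb (n r : Int) : Int := (n.toNat.choose r.toNat : Int)

-- ===== PORT A =====
def chord_count (n : Int) (k : Int) : Int :=
  if k ≤ 0 ∨ 2 * k > n then 0
  else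
    let result := (PySem.List.pyRange 1 (k + 1) 1).foldl
      (fun result i =>
        let m := n - 2 * (i - 1)
        result * PySem.Int.floordiv (m * (m - 1)) 2) 1
    PySem.Int.floordiv result (pyFactorial k)

-- ===== PORT B =====
def chord_count_alt (n : Int) (k : Int) : Int :=
  if k ≤ 0 ∨ 2 * k > n then 0
  else
    -- 2 ** k : exact for k ≥ 0, which the guard guarantees
    PySem.Int.floordiv (pyComb n (2 * k) * pyFactorial (2 * k)) (2 ^ k.toNat * pyFactorial k)

-- ===== PRECONDITION & SPEC =====
def Spec_chord_count (n : Int) (k : Int) (out : Int) : Prop := out = chord_count_alt n k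
instance (n : Int) (k : Int) (out : Int) : Decidable (Spec_chord_count n k out) := by unfold Spec_chord_count; infer_instance

-- ===== CLAIM (what is proved, stated in full; the proofs are below) =====
def Claim_equal_chord_count : Prop := ∀ (n : Int) (k : Int), Dom_chord_count n k → Spec_chord_count n k (chord_count n k)

-- ===== LEMMAS AND PROOFS =====

-- Nat-level mirror of A's loop: loopNat N K = ∏_{i<K} C(N-2i, 2)
def loopNat (N : Nat) : Nat → Nat
  | 0 => 1
  | K + 1 => loopNat N K * ((N - 2 * K) * (N - 2 * K - 1) / 2)

-- double factorial (2K-1)!! = ∏_{i<K} (2i+1)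
def oddDF : Nat → Nat
  | 0 => 1
  | K + 1 => oddDF K * (2 * K + 1)

theorem oddDF_fact (K : Nat) : 2 ^ K * Nat.factorial K * oddDF K = Nat.factorial (2 * K) := by
  induction K with
  | zero => rfl
  | succ K ih =>
    have h2 : 2 * (K + 1) = (2 * K + 1) + 1 := by ring
    simp only [h2, Nat.factorial_succ, oddDF, pow_succ]
    rw [← ih]
    ring

theorem loopNat_step_even (m : Nat) : 2 ∣ m * (m - 1) := by
  rcases Nat.even_or_odd m with h | h
  · exact Dvd.dvd.mul_right h.two_dvd _
  · rcases m with _ | m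
    · simp
    · exact Dvd.dvd.mul_left (by simpa using (Nat.Odd.sub_odd h odd_one).two_dvd) _

theorem loopNat_fact (K N : Nat) (h : 2 * K ≤ N) :
    loopNat N K * 2 ^ K * (N - 2 * K).factorial = N.factorial := by
  induction K with
  | zero => simp [loopNat]
  | succ K ih =>
    have hK : 2 * K ≤ N := by omega
    have hfac : (N - 2 * K).factorial
        = (N - 2 * K) * ((N - 2 * K - 1) * (N - 2 * (K + 1)).factorial) := by
      have e1 : N - 2 * K = (N - 2 * K - 1) + 1 := by omega
      have e2 : N - 2 * K - 1 = (N - 2 * (K + 1)) + 1 := by omega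
      rw [e1, Nat.factorial_succ, ← e1, e2, Nat.factorial_succ, ← e2]
    have hdiv : (N - 2 * K) * (N - 2 * K - 1) / 2 * 2 = (N - 2 * K) * (N - 2 * K - 1) :=
      Nat.div_mul_cancel (loopNat_step_even _)
    calc loopNat N (K + 1) * 2 ^ (K + 1) * (N - 2 * (K + 1)).factorial
        = loopNat N K * 2 ^ K * ((N - 2 * K) * (N - 2 * K - 1) / 2 * 2
            * (N - 2 * (K + 1)).factorial) := by rw [loopNat]; ring
      _ = loopNat N K * 2 ^ K * (N - 2 * K).factorial := by rw [hdiv, hfac]; ring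
      _ = N.factorial := ih hK

-- loopNat N K = (N.choose (2K)) * K! * oddDF K, hence both divisions below are exact
theorem loopNat_eq (K N : Nat) (h : 2 * K ≤ N) :
    loopNat N K = N.choose (2 * K) * Nat.factorial K * oddDF K := by
  have hch := Nat.choose_mul_factorial_mul_factorial h
  have h1 := loopNat_fact K N h
  have h2 := oddDF_fact K
  have hpos : 0 < 2 ^ K * (N - 2 * K).factorial :=
    Nat.mul_pos (pow_pos (by norm_num : (0:Nat) < 2) K) (Nat.factorial_pos _)
  apply Nat.eq_of_mul_eq_mul_right hpos
  calc loopNat N K * (2 ^ K * (N - 2 * K).factorial)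
      = loopNat N K * 2 ^ K * (N - 2 * K).factorial := by ring
    _ = N.factorial := h1
    _ = N.choose (2 * K) * Nat.factorial (2 * K) * (N - 2 * K).factorial := hch.symm
    _ = N.choose (2 * K) * (2 ^ K * Nat.factorial K * oddDF K) * (N - 2 * K).factorial := by
        rw [h2]
    _ = N.choose (2 * K) * Nat.factorial K * oddDF K * (2 ^ K * (N - 2 * K).factorial) := by
        ring

theorem natA_eq (K N : Nat) (h : 2 * K ≤ N) :
    loopNat N K / Nat.factorial K = N.choose (2 * K) * oddDF K := by
  rw [loopNat_eq K N h]
  have : N.choose (2 * K) * Nat.factorial K * oddDF K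
      = Nat.factorial K * (N.choose (2 * K) * oddDF K) := by ring
  rw [this, Nat.mul_div_cancel_left _ (Nat.factorial_pos K)]

theorem natB_eq (K N : Nat) :
    N.choose (2 * K) * Nat.factorial (2 * K) / (2 ^ K * Nat.factorial K)
      = N.choose (2 * K) * oddDF K := by
  rw [← oddDF_fact K,
    show N.choose (2 * K) * (2 ^ K * Nat.factorial K * oddDF K)
      = 2 ^ K * Nat.factorial K * (N.choose (2 * K) * oddDF K) by ring,
    Nat.mul_div_cancel_left _
      (Nat.mul_pos (pow_pos (by norm_num : (0:Nat) < 2) K) (Nat.factorial_pos K))]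

-- A's foldl over range(1, k+1) computes loopNat
theorem foldl_loop (K : Nat) (n : Int) (hn : 2 * (K : Int) ≤ n) :
    (PySem.List.pyRange 1 ((K : Int) + 1) 1).foldl
      (fun result i =>
        let m := n - 2 * (i - 1)
        result * PySem.Int.floordiv (m * (m - 1)) 2) 1
    = (loopNat n.toNat K : Int) := by
  induction K with
  | zero => rw [PySem.List.pyRange_one_eq_nil (by norm_num)]; simp [loopNat]
  | succ K ih =>
    have hK : 2 * (K : Int) ≤ n := by push_cast at hn ⊢; omega
    have hsplit : PySem.List.pyRange 1 ((K : Int) + 1 + 1) 1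
        = PySem.List.pyRange 1 ((K : Int) + 1) 1 ++ [(K : Int) + 1] := by
      simpa using PySem.List.pyRange_one_succ_right (show (1:Int) ≤ (K : Int) + 1 by omega)
    rw [show (((K + 1 : Nat)) : Int) + 1 = (K : Int) + 1 + 1 by push_cast; ring, hsplit,
      List.foldl_append, ih hK]
    simp only [List.foldl_cons, List.foldl_nil]
    have hcast : n - 2 * ((K : Int) + 1 - 1) = ((n.toNat - 2 * K : Nat) : Int) := by
      push_cast at hn ⊢; omega
    have hcast' : n - 2 * ((K : Int) + 1 - 1) - 1
        = ((n.toNat - 2 * K - 1 : Nat) : Int) := by push_cast at hn ⊢; omega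
    rw [hcast', hcast]
    rw [show ((n.toNat - 2 * K : Nat) : Int) * ((n.toNat - 2 * K - 1 : Nat) : Int)
        = (((n.toNat - 2 * K) * (n.toNat - 2 * K - 1) : Nat) : Int) by push_cast; ring]
    rw [show ((2 : Int)) = ((2 : Nat) : Int) by norm_num,
      PySem.Int.floordiv_natCast, loopNat]
    push_cast
    ring

-- ===== VERDICT (by name: the statement is the Claim_ definition above) =====
theorem chord_count_spec : Claim_equal_chord_count := by
  intro n k _
  show chord_count n k = chord_count_alt n k
  unfold chord_count chord_count_alt
  by_cases hg : k ≤ 0 ∨ 2 * k > n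
  · simp [hg]
  · simp only [hg, if_false]
    push Not at hg
    obtain ⟨hk, hkn⟩ := hg
    set K := k.toNat with hKdef
    set N := n.toNat with hNdef
    have hkK : k = (K : Int) := by omega
    have hnN : n = (N : Int) := by omega
    have hKN : 2 * K ≤ N := by omega
    have hloop := foldl_loop K n (by omega)
    rw [hkK, hloop]
    unfold pyFactorial pyComb
    have htk : ((K : Int)).toNat = K := by omega
    have ht2k : (2 * (K : Int)).toNat = 2 * K := by omega
    have htn : n.toNat = N := rfl
    rw [htk, ht2k, htn]
    rw [PySem.Int.floordiv_natCast]
    rw [show ((N.choose (2 * K) : Int) * (Nat.factorial (2 * K) : Int))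
        = ((N.choose (2 * K) * Nat.factorial (2 * K) : Nat) : Int) by push_cast; ring,
      show ((2 : Int) ^ K * (Nat.factorial K : Int))
        = ((2 ^ K * Nat.factorial K : Nat) : Int) by push_cast; ring]
    rw [PySem.Int.floordiv_natCast]
    rw [natA_eq K N hKN, natB_eq K N]
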